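-- pv_equiv track=rewrite | github.com/maiyuren/Hybrid-Quantum-Autoencoder | required_modules/qnn_gate_types_and_depth.py | staircase_coupling
-- ===== SOURCE A (Python) =====
-- def staircase_coupling(num_params, n_qubits):
--     couplings = []
--     i = 0
--     while len(couplings) < num_params:
--         if i < n_qubits - 1:
--             couplings.append([i, i + 1])
--             i += 1
--         else:
--             i = 0
--     return couplings
-- ===== SOURCE B (Python) =====
-- def staircase_coupling(num_params, n_qubits):
--     base = [[i, i + 1] for i in range(min(num_params, n_qubits - 1))]
--     result = []
--     while len(result) < num_params:
--         result += base
--     return result[:num_params]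
-- ===== Notes on version B (the rewrite author's own statement) =====
-- stated objective: faster
-- what changed: B precomputes one staircase cycle block (capped at num_params pairs) with a range comprehension, grows the result by whole-block list extension, and slices to num_params, instead of A's element-at-a-time append loop with a hand-reset index.
import Mathlib
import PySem

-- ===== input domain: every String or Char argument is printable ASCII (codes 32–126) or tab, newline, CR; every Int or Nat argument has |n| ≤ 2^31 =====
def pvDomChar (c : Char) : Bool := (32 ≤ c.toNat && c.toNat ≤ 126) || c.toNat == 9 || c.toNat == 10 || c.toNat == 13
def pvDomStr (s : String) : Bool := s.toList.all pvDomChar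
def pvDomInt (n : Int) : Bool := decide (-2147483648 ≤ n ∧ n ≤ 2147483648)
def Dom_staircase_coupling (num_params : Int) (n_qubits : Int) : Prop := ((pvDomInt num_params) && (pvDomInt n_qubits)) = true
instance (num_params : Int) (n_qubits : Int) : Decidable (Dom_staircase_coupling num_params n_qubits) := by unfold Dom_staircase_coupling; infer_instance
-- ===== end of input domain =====

-- B builds one staircase cycle as a block and repeats it whole, then slices to num_params; A appends
-- pair by pair with a hand-reset index. Equivalence of return values is proved on Pre_ (where A terminates).

-- ===== PORT A =====
-- A's while loop, step for step: state (couplings, i); guard len(couplings) < num_params;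
-- the Nat fuel only makes the recursion total — on Pre_ the supplied fuel is never exhausted.
def scLoopA (num_params : Int) (n_qubits : Int) : Nat → List (List Int) → Int → List (List Int)
  | 0, couplings, _ => couplings
  | fuel + 1, couplings, i =>
      if (couplings.length : Int) < num_params then
        if i < n_qubits - 1 then
          scLoopA num_params n_qubits fuel (couplings ++ [[i, i + 1]]) (i + 1)
        else
          scLoopA num_params n_qubits fuel couplings 0
      else couplings

def staircase_coupling (num_params : Int) (n_qubits : Int) : List (List Int) :=
  scLoopA num_params n_qubits (2 * num_params.toNat + 2) [] 0

-- ===== PORT B =====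
-- B: base = [[i, i+1] for i in range(min(num_params, n_qubits-1))]
def scBase (num_params : Int) (n_qubits : Int) : List (List Int) :=
  (PySem.List.pyRange 0 (min num_params (n_qubits - 1)) 1).map (fun i => [i, i + 1])

-- B's while loop: result grows by whole-block 'result += base'; fuel again only for totality.
def scLoopB (num_params : Int) (base : List (List Int)) : Nat → List (List Int) → List (List Int)
  | 0, result => result
  | fuel + 1, result =>
      if (result.length : Int) < num_params then scLoopB num_params base fuel (result ++ base)
      else result

-- then 'return result[:num_params]'
def staircase_coupling_alt (num_params : Int) (n_qubits : Int) : List (List Int) :=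
  PySem.List.slice (scLoopB num_params (scBase num_params n_qubits) (num_params.toNat + 1) []) none (some num_params)

-- ===== PRECONDITION & SPEC =====
-- Pre_ excludes exactly the inputs (num_params > 0 and n_qubits ≤ 1) on which Python A loops forever.
def Pre_staircase_coupling (num_params : Int) (n_qubits : Int) : Prop :=
  num_params ≤ 0 ∨ 2 ≤ n_qubits
instance (num_params : Int) (n_qubits : Int) : Decidable (Pre_staircase_coupling num_params n_qubits) := by
  unfold Pre_staircase_coupling; infer_instance

def pvWitness_staircase_coupling : Int × Int := (7, 4)

def Spec_staircase_coupling (num_params : Int) (n_qubits : Int) (out : List (List Int)) : Prop := out = staircase_coupling_alt num_params n_qubits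
instance (num_params : Int) (n_qubits : Int) (out : List (List Int)) : Decidable (Spec_staircase_coupling num_params n_qubits out) := by unfold Spec_staircase_coupling; infer_instance

-- ===== CLAIM (what is proved, stated in full; the proofs are below) =====
def Claim_equal_staircase_coupling : Prop := ∀ (num_params : Int) (n_qubits : Int), Dom_staircase_coupling num_params n_qubits → Pre_staircase_coupling num_params n_qubits → Spec_staircase_coupling num_params n_qubits (staircase_coupling num_params n_qubits)

-- ===== LEMMAS AND PROOFS =====

-- the staircase segment [[i,i+1], …, [n_qubits-2, n_qubits-1]]  (scBase n_qubits = scSeg n_qubits 0 by rfl)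
def scSeg (n_qubits : Int) (i : Int) : List (List Int) :=
  (PySem.List.pyRange i (n_qubits - 1) 1).map (fun k => [k, k + 1])

-- common description of the first n staircase pairs starting at (normalised) index i
def scSpec (n_qubits : Int) : Nat → Int → List (List Int)
  | 0, _ => []
  | n + 1, i =>
      let j := if i < n_qubits - 1 then i else 0
      [j, j + 1] :: scSpec n_qubits n (j + 1)

theorem scSpec_reset (n_qubits : Int) (n : Nat) (i : Int) (h : ¬ i < n_qubits - 1) :
    scSpec n_qubits n i = scSpec n_qubits n 0 := by
  cases n with
  | zero => rfl
  | succ m => by_cases h0 : (0:Int) < n_qubits - 1 <;> simp [scSpec, h]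

theorem scLoopA_spec (num_params n_qubits : Int) (hq : 2 ≤ n_qubits) :
    ∀ (fuel : Nat) (n : Nat) (c : List (List Int)) (i : Int),
      0 ≤ i → i ≤ n_qubits - 1 → num_params = c.length + n →
      2 * n + (if i < n_qubits - 1 then 0 else 1) ≤ fuel →
      scLoopA num_params n_qubits fuel c i = c ++ scSpec n_qubits n i := by
  intro fuel
  induction fuel with
  | zero =>
      intro n c i h0 h1 hn hf
      have hn0 : n = 0 := by split_ifs at hf <;> omega
      subst hn0; simp [scLoopA, scSpec]
  | succ f ih =>
      intro n c i h0 h1 hn hf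
      cases n with
      | zero =>
          have : ¬ ((c.length : Int) < num_params) := by omega
          simp [scLoopA, this, scSpec]
      | succ m =>
          have hg : (c.length : Int) < num_params := by omega
          by_cases hi : i < n_qubits - 1
          · have step : scLoopA num_params n_qubits (f+1) c i
                = scLoopA num_params n_qubits f (c ++ [[i, i + 1]]) (i + 1) := by
              simp [scLoopA, hg, hi]
            rw [if_pos hi] at hf
            rw [step, ih m (c ++ [[i, i+1]]) (i+1) (by omega) (by omega)
                (by simp; omega) (by split_ifs <;> omega)]
            simp [scSpec, hi]
          · have step : scLoopA num_params n_qubits (f+1) c i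
                = scLoopA num_params n_qubits f c 0 := by
              simp [scLoopA, hg, hi]
            rw [if_neg hi] at hf
            have h00 : (0:Int) < n_qubits - 1 := by omega
            rw [step, ih (m+1) c 0 (by omega) (by omega) hn (by rw [if_pos h00]; omega)]
            rw [scSpec_reset n_qubits (m+1) i hi]

-- j whole copies of a base block
def scBlocks (base : List (List Int)) : Nat → List (List Int)
  | 0 => []
  | j + 1 => base ++ scBlocks base j

theorem scBlocks_length (base : List (List Int)) :
    ∀ j, (scBlocks base j).length = j * base.length
  | 0 => by simp [scBlocks]
  | j + 1 => by simp [scBlocks, scBlocks_length base j]; ring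

theorem scLoopB_blocks (num_params : Int) (base : List (List Int)) :
    ∀ (fuel : Nat) (r : List (List Int)),
      1 ≤ base.length →
      num_params.toNat ≤ r.length + fuel * base.length →
      ∃ j, scLoopB num_params base fuel r
            = r ++ scBlocks base j
        ∧ num_params.toNat ≤ (r ++ scBlocks base j).length := by
  intro fuel
  induction fuel with
  | zero =>
      intro r _ hb
      exact ⟨0, by simp [scLoopB, scBlocks], by simpa [scBlocks] using hb⟩
  | succ f ih =>
      intro r hm hb
      have hmul : (f + 1) * base.length = f * base.length + base.length := by ring
      by_cases hg : (r.length : Int) < num_params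
      · obtain ⟨j, hj, hlen⟩ := ih (r ++ base) hm (by simp; omega)
        refine ⟨j + 1, ?_, ?_⟩
        · simp only [scLoopB, hg, if_pos]
          rw [hj]; simp [scBlocks]
        · simp [scBlocks]; simp at hlen; omega
      · exact ⟨0, by simp [scLoopB, hg, scBlocks], by simp [scBlocks]; omega⟩

theorem take_seg_blocks (n_qubits : Int) (hq : 2 ≤ n_qubits) :
    ∀ (n : Nat) (i : Int) (j : Nat), 0 ≤ i → i ≤ n_qubits - 1 →
      n ≤ (scSeg n_qubits i).length + j * (scSeg n_qubits 0).length →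
      List.take n (scSeg n_qubits i ++ scBlocks (scSeg n_qubits 0) j) = scSpec n_qubits n i := by
  intro n
  induction n with
  | zero => intro i j _ _ _; simp [scSpec]
  | succ m ih =>
      intro i j h0 h1 hn
      by_cases hi : i < n_qubits - 1
      · have hcons : scSeg n_qubits i = [i, i+1] :: scSeg n_qubits (i+1) := by
          unfold scSeg
          rw [PySem.List.pyRange_one_cons hi]; simp
        have hlen : (scSeg n_qubits i).length = (scSeg n_qubits (i+1)).length + 1 := by
          rw [hcons]; simp
        rw [hcons]
        simp only [List.cons_append, List.take_succ_cons]
        rw [ih (i+1) j (by omega) (by omega) (by omega)]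
        simp [scSpec, hi]
      · have hnil : scSeg n_qubits i = [] := by
          unfold scSeg
          rw [PySem.List.pyRange_one_eq_nil (by omega)]; simp
        have hlen0 : (scSeg n_qubits i).length = 0 := by rw [hnil]; rfl
        obtain ⟨j', rfl⟩ : ∃ j', j = j' + 1 := by
          refine ⟨j - 1, ?_⟩
          have : 1 ≤ j := by
            by_contra h
            have hj0 : j = 0 := by omega
            subst hj0; omega
          omega
        rw [hnil]
        show List.take (m+1) ([] ++ (scSeg n_qubits 0 ++ scBlocks (scSeg n_qubits 0) j')) = _
        simp only [List.nil_append]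
        have h00 : (0:Int) < n_qubits - 1 := by omega
        have hcons0 : scSeg n_qubits 0 = [0, 1] :: scSeg n_qubits 1 := by
          unfold scSeg
          rw [PySem.List.pyRange_one_cons h00]; norm_num
        have hlen00 : (scSeg n_qubits 0).length = (scSeg n_qubits 1).length + 1 := by
          rw [hcons0]; simp
        have key : ∀ X : List (List Int), List.take (m+1) (scSeg n_qubits 0 ++ X)
            = [0, 1] :: List.take m (scSeg n_qubits 1 ++ X) := by
          intro X
          rw [hcons0]
          simp
        rw [key]
        have hmul : (j' + 1) * (scSeg n_qubits 0).length
            = j' * (scSeg n_qubits 0).length + (scSeg n_qubits 0).length := by ring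
        rw [ih 1 j' (by omega) (by omega) (by omega)]
        rw [scSpec_reset n_qubits (m+1) i hi]
        simp [scSpec]

-- when the first n indices stay below n_qubits-1, scSpec never resets: it is one range segment
theorem scSpec_noreset (n_qubits : Int) :
    ∀ (n : Nat) (i : Int), i + (n : Int) ≤ n_qubits - 1 →
      scSpec n_qubits n i = (PySem.List.pyRange i (i + (n : Int)) 1).map (fun k => [k, k + 1]) := by
  intro n
  induction n with
  | zero =>
      intro i _
      rw [PySem.List.pyRange_one_eq_nil (by omega)]
      rfl
  | succ m ih =>
      intro i h
      have hi : i < n_qubits - 1 := by omega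
      have hlt : i < i + ((m : Int) + 1) := by omega
      rw [show ((Nat.succ m : Nat) : Int) = (m : Int) + 1 by push_cast; ring] at *
      rw [PySem.List.pyRange_one_cons hlt]
      simp only [List.map_cons]
      have hrw : i + ((m : Int) + 1) = (i + 1) + (m : Int) := by ring
      rw [hrw, ← ih (i + 1) (by omega)]
      simp [scSpec, hi]

-- ===== VERDICT (by name: the statement is the Claim_ definition above) =====
theorem staircase_coupling_spec : Claim_equal_staircase_coupling := by
  intro num_params n_qubits _ hpre
  unfold Spec_staircase_coupling staircase_coupling staircase_coupling_alt
  by_cases hp : num_params ≤ 0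
  · have h0 : ¬ ((0:Int) < num_params) := by omega
    have hA : scLoopA num_params n_qubits (2 * num_params.toNat + 2) [] 0 = [] := by
      simp [scLoopA, h0]
    have hB : scLoopB num_params (scBase num_params n_qubits) (num_params.toNat + 1) [] = [] := by
      simp [scLoopB, h0]
    rw [hA, hB]
    simp [PySem.List.slice]
  · have hq : 2 ≤ n_qubits := by
      rcases hpre with h | h
      · omega
      · exact h
    have hnp : 0 < num_params := by omega
    have hi0 : (0:Int) < n_qubits - 1 := by omega
    -- A side
    rw [scLoopA_spec num_params n_qubits hq (2 * num_params.toNat + 2) num_params.toNat [] 0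
        le_rfl (by omega) (by simp; omega) (by rw [if_pos hi0]; omega)]
    simp only [List.nil_append]
    -- B side: base length is min(num_params, n_qubits-1) ≥ 1
    have hblen : (scBase num_params n_qubits).length = (min num_params (n_qubits - 1)).toNat := by
      unfold scBase
      simp [PySem.List.length_pyRange_one]
    have hmlen : 1 ≤ (scBase num_params n_qubits).length := by rw [hblen]; omega
    have hfuel : num_params.toNat ≤ ([] : List (List Int)).length
        + (num_params.toNat + 1) * (scBase num_params n_qubits).length := by
      have h1 : num_params.toNat ≤ num_params.toNat * (scBase num_params n_qubits).length :=
        Nat.le_mul_of_pos_right _ (by omega)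
      have h2 : (num_params.toNat + 1) * (scBase num_params n_qubits).length
          = num_params.toNat * (scBase num_params n_qubits).length
            + (scBase num_params n_qubits).length := by ring
      simp only [List.length_nil]; omega
    obtain ⟨j, hj, hlen⟩ := scLoopB_blocks num_params (scBase num_params n_qubits)
      (num_params.toNat + 1) [] hmlen hfuel
    rw [hj, PySem.List.slice_to _ (le_of_lt hnp)]
    simp only [List.nil_append] at hlen ⊢
    rw [scBlocks_length] at hlen
    obtain ⟨j', rfl⟩ : ∃ j', j = j' + 1 := by
      refine ⟨j - 1, ?_⟩
      have : 1 ≤ j := by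
        by_contra h
        have hj0 : j = 0 := by omega
        subst hj0; simp at hlen; omega
      omega
    by_cases hcase : n_qubits - 1 ≤ num_params
    · -- full cycle: base = scSeg n_qubits 0
      have hbase : scBase num_params n_qubits = scSeg n_qubits 0 := by
        unfold scBase scSeg
        rw [min_eq_right hcase]
      rw [hbase] at hlen ⊢
      have hb1 : scBlocks (scSeg n_qubits 0) (j' + 1)
          = scSeg n_qubits 0 ++ scBlocks (scSeg n_qubits 0) j' := rfl
      rw [hb1]
      have hmul : (j' + 1) * (scSeg n_qubits 0).length
          = j' * (scSeg n_qubits 0).length + (scSeg n_qubits 0).length := by ring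
      exact (take_seg_blocks n_qubits hq num_params.toNat 0 j' le_rfl (by omega) (by omega)).symm
    · -- short run: base already holds the first num_params pairs, one block is enough
      have hmin : min num_params (n_qubits - 1) = num_params := min_eq_left (by omega)
      have hlenN : (scBase num_params n_qubits).length = num_params.toNat := by
        rw [hblen, hmin]
      have hb1 : scBlocks (scBase num_params n_qubits) (j' + 1)
          = scBase num_params n_qubits ++ scBlocks (scBase num_params n_qubits) j' := rfl
      rw [hb1]
      have htake : List.take num_params.toNat
          (scBase num_params n_qubits ++ scBlocks (scBase num_params n_qubits) j')
          = scBase num_params n_qubits := by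
        rw [← hlenN]
        exact List.take_left
      rw [htake]
      have hnr := scSpec_noreset n_qubits num_params.toNat 0 (by omega)
      rw [hnr]
      unfold scBase
      rw [hmin]
      have hc : (0 : Int) + (num_params.toNat : Int) = num_params := by omega
      rw [hc]
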